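-- pv_equiv track=rewrite | github.com/fruzly/open_deep_research | src/open_deep_research/intelligent_research/iterative_controller.py | _parse_search_results_string
-- ===== SOURCE A (Python) =====
-- from typing import Dict, Any, List, Optional, Tuple
--
-- def _parse_search_results_string(search_results_str: str, queries: List[str]) -> List[Dict[str, Any]]:
--     """Parse search result string (original implementation)"""
--
--     results = []
--
--     # Simple parsing based on the search result string
--     lines = search_results_str.split('\n')
--     current_result = {}
--
--     for line in lines:
--         line = line.strip()
--         if line.startswith('--- SOURCE'):
--             if current_result:
--                 results.append(current_result)
--             current_result = {'title': '', 'url': '', 'content': ''}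
--         elif line.startswith('URL:'):
--             current_result['url'] = line.replace('URL:', '').strip()
--         elif line and not line.startswith('---') and not line.startswith('SUMMARY:') and not line.startswith('FULL CONTENT:'):
--             if 'title' not in current_result or not current_result['title']:
--                 current_result['title'] = line
--             else:
--                 current_result['content'] += line + ' '
--
--     # Add the last result
--     if current_result:
--         results.append(current_result)
--
--     # If parsing fails, create placeholder results
--     if not results:
--         for i, query in enumerate(queries):
--             results.append({
--                 'title': f'Search Result {i+1}',
--                 'url': f'https://example.com/result{i+1}',
--                 'content': f'Content for search result regarding "{query}"...',
--                 'query': query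
--             })
--
--     return results
-- ===== SOURCE B (Python) =====
-- from typing import Dict, Any, List
--
-- def _parse_search_results_string(search_results_str: str, queries: List[str]) -> List[Dict[str, Any]]:
--     """Parse search result string: split into marker-delimited blocks, then map a per-block parser."""
--     lines = [l.strip() for l in search_results_str.split('\n')]
--
--     def is_marker(l):
--         return l.startswith('--- SOURCE')
--
--     def eligible(l):
--         return bool(l) and not l.startswith('---') and not l.startswith('SUMMARY:') and not l.startswith('FULL CONTENT:')
--
--     # Split the stripped lines into the pre-marker block and one block per marker.
--     blocks, cur = [], []
--     for l in lines:
--         if is_marker(l):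
--             blocks.append(cur)
--             cur = []
--         else:
--             cur.append(l)
--     blocks.append(cur)
--     pre, *sections = blocks
--
--     def parse(block, d):
--         for l in block:
--             if l.startswith('URL:'):
--                 d['url'] = l.replace('URL:', '').strip()
--             elif eligible(l):
--                 if not d.get('title'):
--                     d['title'] = l
--                 else:
--                     d['content'] = d.get('content', '') + l + ' '
--         return d
--
--     results = [parse(pre, {})] if any(l.startswith('URL:') or eligible(l) for l in pre) else []
--     results += [parse(s, {'title': '', 'url': '', 'content': ''}) for s in sections]
--
--     if not results:
--         results = [{
--             'title': f'Search Result {i+1}',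
--             'url': f'https://example.com/result{i+1}',
--             'content': f'Content for search result regarding "{query}"...',
--             'query': query,
--         } for i, query in enumerate(queries)]
--     return results
-- ===== Notes on version B (the rewrite author's own statement) =====
-- stated objective: alternative
-- what changed: B replaces A's single stateful line loop (current-dict accumulator with marker flushes) by a two-phase decomposition: first split the stripped lines into the pre-marker block plus one block per '--- SOURCE' marker, then map an independent per-block parser over the blocks.
import Mathlib
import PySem

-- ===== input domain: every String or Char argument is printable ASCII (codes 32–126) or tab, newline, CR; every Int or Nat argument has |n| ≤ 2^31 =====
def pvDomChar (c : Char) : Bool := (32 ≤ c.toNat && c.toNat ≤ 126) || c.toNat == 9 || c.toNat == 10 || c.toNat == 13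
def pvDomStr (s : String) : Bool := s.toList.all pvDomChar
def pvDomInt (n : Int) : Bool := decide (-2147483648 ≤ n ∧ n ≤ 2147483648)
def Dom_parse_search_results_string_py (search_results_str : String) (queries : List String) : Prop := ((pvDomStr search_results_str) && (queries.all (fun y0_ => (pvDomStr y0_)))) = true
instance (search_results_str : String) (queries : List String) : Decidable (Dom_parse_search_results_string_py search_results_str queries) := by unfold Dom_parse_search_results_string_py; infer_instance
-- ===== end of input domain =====

-- B re-parses the string by first splitting it into marker-delimited blocks and then mapping a
-- per-block parser, instead of A's single stateful line loop; same return value on Pre_ (objective: alternative).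

-- ===== PORT A =====
-- A-side helper: the body of A's for-loop (strip the line, then A's branch chain, in A's order).
-- Where Python's `current_result['content']` would raise KeyError ('content' key absent, reachable
-- only when ≥ 2 content-eligible lines precede the first '--- SOURCE' marker) the port reads
-- (get? …).getD "" instead; Pre_ excludes exactly those inputs.
def pvAStep (st : List (PySem.Dict String String) × PySem.Dict String String) (rawLine : String) :
    List (PySem.Dict String String) × PySem.Dict String String :=
  let line := PySem.Str.strip rawLine
  if PySem.Str.startswith line "--- SOURCE" then
    ((if st.2.items = [] then st.1 else st.1 ++ [st.2]),
      PySem.Dict.ofList [("title", ""), ("url", ""), ("content", "")])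
  else if PySem.Str.startswith line "URL:" then
    (st.1, st.2.insert "url" (PySem.Str.strip (PySem.Str.replace line "URL:" "")))
  else if !(line == "") && !PySem.Str.startswith line "---" && !PySem.Str.startswith line "SUMMARY:"
            && !PySem.Str.startswith line "FULL CONTENT:" then
    (st.1,
      if (match st.2.get? "title" with | none => true | some t => t == "") then
        st.2.insert "title" line
      else
        st.2.insert "content" (((st.2.get? "content").getD "") ++ line ++ " "))
  else st

def parse_search_results_string_py (search_results_str : String) (queries : List String) : List (List (String × String)) :=
  let lines := (PySem.Str.split? search_results_str "\n").getD []   -- separator "\n" ≠ "", so split? is never none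
  let fin := lines.foldl pvAStep ([], PySem.Dict.empty)
  let results := if fin.2.items = [] then fin.1 else fin.1 ++ [fin.2]
  let results := if results = [] then
      (PySem.List.enumerate queries).foldl (fun acc iq =>
        acc ++ [PySem.Dict.ofList
          [("title", "Search Result " ++ PySem.Int.toStr (iq.1 + 1)),
           ("url", "https://example.com/result" ++ PySem.Int.toStr (iq.1 + 1)),
           ("content", "Content for search result regarding \"" ++ iq.2 ++ "\"..."),
           ("query", iq.2)]]) results
    else results
  results.map (fun d => d.items)

-- ===== PORT B =====
def pvIsMarker (l : String) : Bool := PySem.Str.startswith l "--- SOURCE"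

def pvEligible (l : String) : Bool :=
  !(l == "") && !PySem.Str.startswith l "---" && !PySem.Str.startswith l "SUMMARY:"
    && !PySem.Str.startswith l "FULL CONTENT:"

-- body of B's block-splitting loop
def pvSplitStep (st : List (List String) × List String) (l : String) :
    List (List String) × List String :=
  if pvIsMarker l then (st.1 ++ [st.2], []) else (st.1, st.2 ++ [l])

-- body of B's per-block parse loop
def pvBStep (d : PySem.Dict String String) (l : String) : PySem.Dict String String :=
  if PySem.Str.startswith l "URL:" then
    d.insert "url" (PySem.Str.strip (PySem.Str.replace l "URL:" ""))
  else if pvEligible l then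
    if d.getD "title" "" == "" then d.insert "title" l
    else d.insert "content" (d.getD "content" "" ++ l ++ " ")
  else d

def pvParseBlock (block : List String) (d : PySem.Dict String String) : PySem.Dict String String :=
  block.foldl pvBStep d

def parse_search_results_string_py_alt (search_results_str : String) (queries : List String) : List (List (String × String)) :=
  let lines := ((PySem.Str.split? search_results_str "\n").getD []).map PySem.Str.strip
  let sp := lines.foldl pvSplitStep ([], [])
  match sp.1 ++ [sp.2] with        -- 'pre, *sections = blocks'; the [] case is unreachable
  | [] => []
  | pre :: sections =>
    let results :=
      (if pre.any (fun l => PySem.Str.startswith l "URL:" || pvEligible l)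
       then [pvParseBlock pre PySem.Dict.empty] else [])
      ++ sections.map (fun b =>
           pvParseBlock b (PySem.Dict.ofList [("title", ""), ("url", ""), ("content", "")]))
    let results := if results = [] then
        (PySem.List.enumerate queries).map (fun iq => PySem.Dict.ofList
          [("title", "Search Result " ++ PySem.Int.toStr (iq.1 + 1)),
           ("url", "https://example.com/result" ++ PySem.Int.toStr (iq.1 + 1)),
           ("content", "Content for search result regarding \"" ++ iq.2 ++ "\"..."),
           ("query", iq.2)])
      else results
    results.map (fun d => d.items)

-- ===== PRECONDITION & SPEC =====
-- Pre_ excludes exactly the inputs on which A raises KeyError: those where at least two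
-- content-eligible lines (nonempty after strip, not starting with 'URL:', '---', 'SUMMARY:' or
-- 'FULL CONTENT:') occur before the first '--- SOURCE' marker line.
def Pre_parse_search_results_string_py (search_results_str : String) (queries : List String) : Prop :=
  ((((PySem.Str.split? search_results_str "\n").getD []).map PySem.Str.strip).takeWhile
      (fun l => !PySem.Str.startswith l "--- SOURCE")).countP
      (fun l => !PySem.Str.startswith l "URL:" && !(l == "") && !PySem.Str.startswith l "---"
                  && !PySem.Str.startswith l "SUMMARY:" && !PySem.Str.startswith l "FULL CONTENT:") ≤ 1
instance (search_results_str : String) (queries : List String) : Decidable (Pre_parse_search_results_string_py search_results_str queries) := by unfold Pre_parse_search_results_string_py; infer_instance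

def pvWitness_parse_search_results_string_py : String × List String :=
  ("--- SOURCE 1 ---\nSome Title\nURL: http://example.org\nbody text\n--- SOURCE 2 ---\nOther", ["q1"])

def Spec_parse_search_results_string_py (search_results_str : String) (queries : List String) (out : List (List (String × String))) : Prop := out = parse_search_results_string_py_alt search_results_str queries
instance (search_results_str : String) (queries : List String) (out : List (List (String × String))) : Decidable (Spec_parse_search_results_string_py search_results_str queries out) := by unfold Spec_parse_search_results_string_py; infer_instance

-- ===== CLAIM (what is proved, stated in full; the proofs are below) =====
def Claim_equal_parse_search_results_string_py : Prop := ∀ (search_results_str : String) (queries : List String), Dom_parse_search_results_string_py search_results_str queries → Pre_parse_search_results_string_py search_results_str queries → Spec_parse_search_results_string_py search_results_str queries (parse_search_results_string_py search_results_str queries)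

-- ===== LEMMAS AND PROOFS =====

-- A's loop body on an already-stripped line
def pvAStepS (st : List (PySem.Dict String String) × PySem.Dict String String) (line : String) :
    List (PySem.Dict String String) × PySem.Dict String String :=
  if PySem.Str.startswith line "--- SOURCE" then
    ((if st.2.items = [] then st.1 else st.1 ++ [st.2]),
      PySem.Dict.ofList [("title", ""), ("url", ""), ("content", "")])
  else if PySem.Str.startswith line "URL:" then
    (st.1, st.2.insert "url" (PySem.Str.strip (PySem.Str.replace line "URL:" "")))
  else if !(line == "") && !PySem.Str.startswith line "---" && !PySem.Str.startswith line "SUMMARY:"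
            && !PySem.Str.startswith line "FULL CONTENT:" then
    (st.1,
      if (match st.2.get? "title" with | none => true | some t => t == "") then
        st.2.insert "title" line
      else
        st.2.insert "content" (((st.2.get? "content").getD "") ++ line ++ " "))
  else st

def pvInit : PySem.Dict String String :=
  PySem.Dict.ofList [("title", ""), ("url", ""), ("content", "")]

def pvFin (st : List (PySem.Dict String String) × PySem.Dict String String) :
    List (PySem.Dict String String) :=
  if st.2.items = [] then st.1 else st.1 ++ [st.2]

def pvEmit (d : PySem.Dict String String) : List (PySem.Dict String String) :=
  if d.items = [] then [] else [d]

-- pure (pre-block, sections) decomposition of a stripped line list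
def pvBlocksP : List String → List String × List (List String)
  | [] => ([], [])
  | l :: ls =>
    if pvIsMarker l then ([], (pvBlocksP ls).1 :: (pvBlocksP ls).2)
    else (l :: (pvBlocksP ls).1, (pvBlocksP ls).2)

theorem pvSplit_spec (ls : List String) (bs : List (List String)) (cur : List String) :
    (ls.foldl pvSplitStep (bs, cur)).1 ++ [(ls.foldl pvSplitStep (bs, cur)).2]
      = bs ++ (cur ++ (pvBlocksP ls).1) :: (pvBlocksP ls).2 := by
  induction ls generalizing bs cur with
  | nil => simp [pvBlocksP]
  | cons l ls ih =>
    by_cases h : pvIsMarker l = true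
    · simp [List.foldl_cons, pvSplitStep, h, pvBlocksP, ih]
    · simp only [Bool.not_eq_true] at h
      simp [List.foldl_cons, pvSplitStep, h, pvBlocksP, ih]

theorem pvInsert_items_ne_nil (d : PySem.Dict String String) (k : String) (v : String) :
    (d.insert k v).items ≠ [] := by
  rw [PySem.Dict.items_insert]
  split_ifs with h
  · cases hd : d.items with
    | nil =>
      exfalso
      rw [PySem.Dict.contains_iff_mem_keys] at h
      simp only [PySem.Dict.keys, hd, List.map_nil, List.not_mem_nil] at h
    | cons a t => simp
  · simp

theorem pvBStep_items_nil (d : PySem.Dict String String) (l : String) :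
    ((pvBStep d l).items = [] ↔
      d.items = [] ∧ (PySem.Str.startswith l "URL:" || pvEligible l) = false) := by
  unfold pvBStep
  split_ifs with h1 h2 h3 <;>
    simp_all [pvInsert_items_ne_nil]

theorem pvParseBlock_items_nil (b : List String) (d : PySem.Dict String String) :
    ((pvParseBlock b d).items = [] ↔
      d.items = [] ∧ b.any (fun l => PySem.Str.startswith l "URL:" || pvEligible l) = false) := by
  induction b generalizing d with
  | nil => simp [pvParseBlock]
  | cons x b ih =>
    show (pvParseBlock b (pvBStep d x)).items = [] ↔ _
    rw [ih, pvBStep_items_nil]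
    simp [List.any_cons, and_assoc, and_comm]

theorem pvParseBlock_ne_nil (b : List String) (d : PySem.Dict String String)
    (hd : d.items ≠ []) : (pvParseBlock b d).items ≠ [] := by
  rw [Ne, pvParseBlock_items_nil]
  intro h
  exact hd h.1

theorem pvAStepS_nonmarker (res : List (PySem.Dict String String))
    (cur : PySem.Dict String String) (l : String) (h : pvIsMarker l = false) :
    pvAStepS (res, cur) l = (res, pvBStep cur l) := by
  unfold pvIsMarker at h
  unfold pvAStepS pvBStep pvEligible
  rw [h]
  simp only [Bool.false_eq_true, if_false]
  by_cases hu : PySem.Str.startswith l "URL:" = true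
  · rw [if_pos hu, if_pos hu]
  · rw [if_neg hu, if_neg hu]
    have htitle : (match cur.get? "title" with | none => true | some t => t == "")
        = (cur.getD "title" "" == "") := by
      rw [PySem.Dict.getD_eq_get?_getD]
      cases cur.get? "title" <;> simp
    have hcontent : (cur.get? "content").getD "" = cur.getD "content" "" :=
      (PySem.Dict.getD_eq_get?_getD cur "content" "").symm
    rw [htitle, hcontent]
    split_ifs <;> rfl

theorem pvMain (ls : List String) (res : List (PySem.Dict String String))
    (cur : PySem.Dict String String) :
    pvFin (ls.foldl pvAStepS (res, cur))
      = res ++ pvEmit (pvParseBlock (pvBlocksP ls).1 cur)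
          ++ ((pvBlocksP ls).2).map (fun b => pvParseBlock b pvInit) := by
  induction ls generalizing res cur with
  | nil =>
    simp only [List.foldl_nil, pvBlocksP, pvParseBlock, pvFin, pvEmit]
    split_ifs <;> simp
  | cons l ls ih =>
    by_cases h : pvIsMarker l = true
    · have hstep : pvAStepS (res, cur) l = (res ++ pvEmit cur, pvInit) := by
        unfold pvIsMarker at h
        unfold pvAStepS pvEmit pvInit
        rw [h]
        simp only [if_true]
        split_ifs <;> simp
      rw [List.foldl_cons, hstep, ih]
      have hne : (pvParseBlock (pvBlocksP ls).1 pvInit).items ≠ [] :=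
        pvParseBlock_ne_nil _ _ (by decide)
      simp only [pvParseBlock] at hne
      simp [pvBlocksP, h, pvParseBlock, pvEmit, hne]
    · simp only [Bool.not_eq_true] at h
      rw [List.foldl_cons, pvAStepS_nonmarker res cur l h, ih]
      simp [pvBlocksP, h, pvParseBlock]

theorem parse_search_results_string_py_spec : Claim_equal_parse_search_results_string_py := by
  intro s queries _dom _pre
  unfold Spec_parse_search_results_string_py
  unfold parse_search_results_string_py parse_search_results_string_py_alt
  simp only []
  set L : List String := (PySem.Str.split? s "\n").getD [] with hL
  -- A's fold over raw lines = stripped fold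
  have hfold : L.foldl pvAStep ([], PySem.Dict.empty)
      = (L.map PySem.Str.strip).foldl pvAStepS ([], PySem.Dict.empty) := by
    rw [List.foldl_map]
    rfl
  rw [hfold]
  set ls : List String := L.map PySem.Str.strip with hls
  -- B's blocks
  have hsp := pvSplit_spec ls [] []
  simp only [List.nil_append] at hsp
  rw [hsp]
  dsimp only
  -- A's results list via the main lemma
  have hmain := pvMain ls [] PySem.Dict.empty
  have hfin : (if (ls.foldl pvAStepS ([], PySem.Dict.empty)).2.items = []
        then (ls.foldl pvAStepS ([], PySem.Dict.empty)).1
        else (ls.foldl pvAStepS ([], PySem.Dict.empty)).1 ++ [(ls.foldl pvAStepS ([], PySem.Dict.empty)).2])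
      = pvEmit (pvParseBlock (pvBlocksP ls).1 PySem.Dict.empty)
          ++ ((pvBlocksP ls).2).map (fun b => pvParseBlock b pvInit) := by
    have := hmain
    unfold pvFin at this
    simpa using this
  rw [hfin]
  -- the pre-block emission equals B's any-guarded singleton
  have hemit : pvEmit (pvParseBlock (pvBlocksP ls).1 PySem.Dict.empty)
      = (if (pvBlocksP ls).1.any (fun l => PySem.Str.startswith l "URL:" || pvEligible l)
         then [pvParseBlock (pvBlocksP ls).1 PySem.Dict.empty] else []) := by
    unfold pvEmit
    by_cases ha : (pvBlocksP ls).1.any (fun l => PySem.Str.startswith l "URL:" || pvEligible l) = true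
    · have hni : ¬ (pvParseBlock (pvBlocksP ls).1 PySem.Dict.empty).items = [] := by
        rw [pvParseBlock_items_nil]
        intro hc
        rw [ha] at hc
        exact absurd hc.2 (by simp)
      rw [if_neg hni, if_pos ha]
    · have hi : (pvParseBlock (pvBlocksP ls).1 PySem.Dict.empty).items = [] := by
        rw [pvParseBlock_items_nil]
        exact ⟨rfl, by simpa using ha⟩
      rw [if_pos hi, if_neg ha]
  rw [hemit]
  rw [show PySem.Dict.ofList [("title", ""), ("url", ""), ("content", "")] = pvInit from rfl]
  set results : List (PySem.Dict String String) :=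
    (if (pvBlocksP ls).1.any (fun l => PySem.Str.startswith l "URL:" || pvEligible l)
     then [pvParseBlock (pvBlocksP ls).1 PySem.Dict.empty] else [])
    ++ ((pvBlocksP ls).2).map (fun b => pvParseBlock b pvInit) with hres
  by_cases hempty : results = []
  · rw [if_pos hempty, if_pos hempty, PySem.List.foldl_append_singleton_eq_map, hempty]
    simp [List.map_map]
  · rw [if_neg hempty, if_neg hempty]
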